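-- pv_equiv track=rewrite | github.com/yavor300/Sofia-University-Facultet-of-Mathematics-and-Informatics | Year-1/Semester-1/Fast-Algorithms-on-Data-Structures/Lecture-and-Lab-02/lca.py | build_rmq_naive
-- ===== SOURCE A (Python) =====
-- def build_rmq_naive(L):
--     n = len(L)
--     RMQ = [[0] * n for _ in range(n)]
--     for i in range(n):
--        RMQ[i][i] = i
--        for j in range(i + 1, n):
--           prev_min_idx = RMQ[i][j-1]
--           RMQ[i][j] = prev_min_idx if L[prev_min_idx] <= L[j] else j
--     return RMQ
-- ===== SOURCE B (Python) =====
-- def build_rmq_naive(L):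
--     n = len(L)
--     table = []
--     for i in range(n):
--         row = []
--         for j in range(n):
--             if j < i:
--                 row.append(0)
--             else:
--                 best = i
--                 for k in range(i + 1, j + 1):
--                     if L[k] < L[best]:
--                         best = k
--                 row.append(best)
--         table.append(row)
--     return table
-- ===== Notes on version B (the rewrite author's own statement) =====
-- stated objective: alternative
-- what changed: Each RMQ[i][j] is computed by an independent fresh scan of L[i..j] tracking the leftmost minimum index, instead of A's incremental recurrence reusing RMQ[i][j-1].
import Mathlib
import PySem

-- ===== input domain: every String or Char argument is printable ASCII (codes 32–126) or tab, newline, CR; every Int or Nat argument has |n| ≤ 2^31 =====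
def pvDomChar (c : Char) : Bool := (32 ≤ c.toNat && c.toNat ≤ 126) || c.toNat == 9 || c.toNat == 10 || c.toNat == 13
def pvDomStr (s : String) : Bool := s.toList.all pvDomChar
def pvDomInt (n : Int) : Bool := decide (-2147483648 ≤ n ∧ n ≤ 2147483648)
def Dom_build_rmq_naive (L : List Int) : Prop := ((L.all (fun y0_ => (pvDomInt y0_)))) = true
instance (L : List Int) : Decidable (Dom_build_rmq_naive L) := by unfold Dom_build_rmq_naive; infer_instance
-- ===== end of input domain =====

-- B replaces A's incremental one-step recurrence with an independent leftmost-argmin scan per cell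
-- (objective: alternative, O(n^3) vs A's O(n^2)); equivalence of the two is proved below.

-- ===== PORT A =====
-- A: RMQ = n×n zero matrix; for each i set RMQ[i][i] = i then fill RMQ[i][j] from RMQ[i][j-1].
def build_rmq_naive (L : List Int) : List (List Int) :=
  let n := L.length
  (List.range n).foldl
    (fun RMQ i =>
      let row0 := (RMQ.getD i []).set i (i : Int)
      let row := (List.range' (i+1) (n - (i+1))).foldl
        (fun row j =>
          let prev := row.getD (j-1) 0
          row.set j (if L.getD prev.toNat 0 ≤ L.getD j 0 then prev else (j : Int)))
        row0
      RMQ.set i row)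
    (List.replicate n (List.replicate n (0 : Int)))

-- ===== PORT B =====
-- B: each cell (i, j) with j ≥ i is its own fresh scan of k over i+1..j keeping the leftmost minimum.
def pvBestScan (L : List Int) (i j : Nat) : Nat :=
  (List.range' (i+1) (j+1-(i+1))).foldl
    (fun best k => if L.getD k 0 < L.getD best 0 then k else best) i

def build_rmq_naive_alt (L : List Int) : List (List Int) :=
  (List.range L.length).map (fun i =>
    (List.range L.length).map (fun j =>
      if j < i then (0 : Int) else (pvBestScan L i j : Int)))

-- ===== PRECONDITION & SPEC =====
def Spec_build_rmq_naive (L : List Int) (out : List (List Int)) : Prop := out = build_rmq_naive_alt L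
instance (L : List Int) (out : List (List Int)) : Decidable (Spec_build_rmq_naive L out) := by unfold Spec_build_rmq_naive; infer_instance

-- ===== CLAIM (what is proved, stated in full; the proofs are below) =====
def Claim_equal_build_rmq_naive : Prop := ∀ (L : List Int), Dom_build_rmq_naive L → Spec_build_rmq_naive L (build_rmq_naive L)

-- ===== LEMMAS AND PROOFS =====

-- Row i of A's table after the inner loop has run up to column m (0 entries elsewhere).
def pvRowFun (L : List Int) (n i m : Nat) : List Int :=
  (List.range n).map (fun j => if i ≤ j ∧ j ≤ m then (pvBestScan L i j : Int) else 0)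

lemma pvRowFun_length (L : List Int) (n i m : Nat) : (pvRowFun L n i m).length = n := by
  simp [pvRowFun]

lemma pvRowFun_getElem (L : List Int) (n i m j : Nat) (h : j < n) :
    (pvRowFun L n i m)[j]'(by simp [pvRowFun_length, h]) =
      if i ≤ j ∧ j ≤ m then (pvBestScan L i j : Int) else 0 := by
  simp [pvRowFun]

lemma pvBestScan_self (L : List Int) (i : Nat) : pvBestScan L i i = i := by
  simp [pvBestScan]

lemma pvBestScan_succ (L : List Int) (i m : Nat) (him : i ≤ m) :
    pvBestScan L i (m+1) =
      if L.getD (pvBestScan L i m) 0 ≤ L.getD (m+1) 0 then pvBestScan L i m else m+1 := by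
  have hr : List.range' (i+1) (m+1+1-(i+1)) = List.range' (i+1) (m+1-(i+1)) ++ [m+1] := by
    have h1 : m+1+1-(i+1) = (m+1-(i+1)) + 1 := by omega
    have h2 : (i+1) + (m+1-(i+1)) = m+1 := by omega
    rw [h1, List.range'_1_concat, h2]
  unfold pvBestScan
  rw [hr, List.foldl_append]
  simp only [List.foldl_cons, List.foldl_nil]
  split_ifs with h1 h2 h2 <;> omega

-- the base row: zeros with entry i set to i
lemma pvRow_base (L : List Int) (n i : Nat) (hi : i < n) :
    (List.replicate n (0 : Int)).set i (i : Int) = pvRowFun L n i i := by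
  apply List.ext_getElem
  · simp [pvRowFun_length]
  · intro j h1 h2
    have hj : j < n := by simpa using h1
    rw [pvRowFun_getElem L n i i j hj]
    by_cases hji : j = i
    · subst hji
      simp [List.getElem_set_self, pvBestScan_self]
    · rw [List.getElem_set_ne (by omega)]
      simp [List.getElem_replicate]
      omega

-- one inner-loop step advances the row from column bound m to m+1
lemma pvRow_step (L : List Int) (n i m : Nat) (him : i ≤ m) (hm : m + 1 < n) :
    (let prev := (pvRowFun L n i m).getD (m+1-1) 0;
      (pvRowFun L n i m).set (m+1)
        (if L.getD prev.toNat 0 ≤ L.getD (m+1) 0 then prev else ((m+1 : Nat) : Int)))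
    = pvRowFun L n i (m+1) := by
  have hmn : m < n := by omega
  have hprev : (pvRowFun L n i m).getD (m+1-1) 0 = (pvBestScan L i m : Int) := by
    have : m+1-1 = m := by omega
    rw [this, List.getD_eq_getElem _ 0 (by simp [pvRowFun_length, hmn]),
      pvRowFun_getElem L n i m m hmn]
    simp [him]
  simp only [hprev]
  have htn : ((pvBestScan L i m : Int)).toNat = pvBestScan L i m := by simp
  rw [htn]
  apply List.ext_getElem
  · simp [pvRowFun_length]
  · intro j h1 h2
    have hj : j < n := by simpa [pvRowFun_length] using h1
    rw [pvRowFun_getElem L n i (m+1) j hj]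
    by_cases hje : j = m+1
    · subst hje
      rw [List.getElem_set_self (by simp [pvRowFun_length, hm])]
      rw [pvBestScan_succ L i m him, if_pos (show i ≤ m+1 ∧ m+1 ≤ m+1 by omega)]
      split_ifs with h <;> simp
    · rw [List.getElem_set_ne (by omega), pvRowFun_getElem L n i m j hj]
      have : (i ≤ j ∧ j ≤ m) ↔ (i ≤ j ∧ j ≤ m+1) := by omega
      simp [this]

-- the whole inner loop, by induction on the number of processed columns
lemma pvRow_loop (L : List Int) (n i t : Nat) (hi : i < n) (ht : i + t < n) :
    (List.range' (i+1) t).foldl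
      (fun row j =>
        let prev := row.getD (j-1) 0
        row.set j (if L.getD prev.toNat 0 ≤ L.getD j 0 then prev else (j : Int)))
      ((List.replicate n (0 : Int)).set i (i : Int))
    = pvRowFun L n i (i + t) := by
  induction t with
  | zero => simpa using pvRow_base L n i hi
  | succ t ih =>
    have ht' : i + t < n := by omega
    rw [List.range'_1_concat, List.foldl_append, ih ht']
    simp only [List.foldl_cons, List.foldl_nil]
    have := pvRow_step L n i (i+t) (by omega) (by omega)
    have harg : (i+1) + t = (i + t) + 1 := by omega
    rw [harg]
    simpa using this

-- row i of B's output
lemma pvAlt_row (L : List Int) (i : Nat) (_hi : i < L.length) :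
    (List.range L.length).map (fun j => if j < i then (0 : Int) else (pvBestScan L i j : Int))
    = pvRowFun L L.length i (L.length - 1) := by
  apply List.ext_getElem
  · simp [pvRowFun_length]
  · intro j h1 h2
    have hj : j < L.length := by simpa using h1
    rw [pvRowFun_getElem L L.length i (L.length - 1) j hj]
    simp only [List.getElem_map, List.getElem_range]
    by_cases h : j < i
    · rw [if_pos h, if_neg (by omega)]
    · rw [if_neg h, if_pos (by omega)]

-- the outer loop: after processing rows 0..t-1, the first t rows are B's rows, the rest are zero
lemma pvOuter_loop (L : List Int) (t : Nat) (ht : t ≤ L.length) :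
    (List.range' 0 t).foldl
      (fun RMQ i =>
        let row0 := (RMQ.getD i []).set i (i : Int)
        let row := (List.range' (i+1) (L.length - (i+1))).foldl
          (fun row j =>
            let prev := row.getD (j-1) 0
            row.set j (if L.getD prev.toNat 0 ≤ L.getD j 0 then prev else (j : Int)))
          row0
        RMQ.set i row)
      (List.replicate L.length (List.replicate L.length (0 : Int)))
    = (List.range L.length).map (fun i =>
        if i < t then pvRowFun L L.length i (L.length - 1)
        else List.replicate L.length (0 : Int)) := by
  induction t with
  | zero =>
    apply List.ext_getElem
    · simp
    · intro j h1 h2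
      simp
  | succ t ih =>
    have ht' : t ≤ L.length := by omega
    have htl : t < L.length := by omega
    rw [List.range'_1_concat, List.foldl_append, ih ht']
    simp only [List.foldl_cons, List.foldl_nil, Nat.zero_add]
    -- the row read at index t is still all zeros
    have hread : ((List.range L.length).map (fun i =>
        if i < t then pvRowFun L L.length i (L.length - 1)
        else List.replicate L.length (0 : Int))).getD t [] = List.replicate L.length (0 : Int) := by
      rw [List.getD_eq_getElem _ [] (by simpa using htl)]
      simp
    rw [hread]
    have hrow := pvRow_loop L L.length t (L.length - (t+1)) htl (by omega)
    have harg : t + (L.length - (t+1)) = L.length - 1 := by omega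
    rw [harg] at hrow
    rw [hrow]
    apply List.ext_getElem
    · simp
    · intro j h1 h2
      have hj : j < L.length := by simpa using h1
      by_cases hje : j = t
      · subst hje
        rw [List.getElem_set_self (by simpa using hj)]
        simp
      · rw [List.getElem_set_ne (by simpa using Ne.symm hje)]
        simp only [List.getElem_map, List.getElem_range]
        have : (j < t) ↔ (j < t + 1) := by omega
        simp [this]

-- ===== VERDICT (by name: the statement is the Claim_ definition above) =====
theorem build_rmq_naive_spec : Claim_equal_build_rmq_naive := by
  intro L _
  unfold Spec_build_rmq_naive build_rmq_naive build_rmq_naive_alt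
  dsimp only
  have h := pvOuter_loop L L.length le_rfl
  rw [List.range_eq_range'] at h ⊢
  rw [h]
  apply List.map_congr_left
  intro i hmem
  have hi : i < L.length := by
    have := List.mem_range'_1.mp hmem
    omega
  rw [if_pos hi]
  have ha := pvAlt_row L i hi
  rw [List.range_eq_range'] at ha
  rw [← ha]
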